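-- pv_equiv track=rewrite | github.com/vytr09/Sigma-automation | improve_splunk_queries.py | analyze_bypass
-- ===== SOURCE A (Python) =====
-- def analyze_bypass(log_entries):
--     """Analyze how the rule was bypassed from log entries."""
--     bypass_info = {
--         "original_command": None,
--         "bypassed_command": None,
--         "bypass_technique": None
--     }
--
--     for entry in log_entries:
--         if entry.get("status") == "BYPASSED":
--             bypass_info["bypassed_command"] = entry.get("command")
--             bypass_info["bypass_technique"] = entry.get("phase")
--         elif entry.get("status") == "DETECTED":
--             bypass_info["original_command"] = entry.get("command")
--
--     return bypass_info
-- ===== SOURCE B (Python) =====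
-- def analyze_bypass(log_entries):
--     """Analyze how the rule was bypassed from log entries."""
--     entries = list(log_entries)
--     byp = next((e for e in reversed(entries) if e.get("status") == "BYPASSED"), None)
--     det = next((e for e in reversed(entries) if e.get("status") == "DETECTED"), None)
--     return {
--         "original_command": det.get("command") if det else None,
--         "bypassed_command": byp.get("command") if byp else None,
--         "bypass_technique": byp.get("phase") if byp else None,
--     }
-- ===== Notes on version B (the rewrite author's own statement) =====
-- stated objective: alternative
-- what changed: Replaces the single interleaved if/elif accumulating loop with two independent reverse searches (last BYPASSED entry, last DETECTED entry) and a direct dict assembly.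
import Mathlib
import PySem

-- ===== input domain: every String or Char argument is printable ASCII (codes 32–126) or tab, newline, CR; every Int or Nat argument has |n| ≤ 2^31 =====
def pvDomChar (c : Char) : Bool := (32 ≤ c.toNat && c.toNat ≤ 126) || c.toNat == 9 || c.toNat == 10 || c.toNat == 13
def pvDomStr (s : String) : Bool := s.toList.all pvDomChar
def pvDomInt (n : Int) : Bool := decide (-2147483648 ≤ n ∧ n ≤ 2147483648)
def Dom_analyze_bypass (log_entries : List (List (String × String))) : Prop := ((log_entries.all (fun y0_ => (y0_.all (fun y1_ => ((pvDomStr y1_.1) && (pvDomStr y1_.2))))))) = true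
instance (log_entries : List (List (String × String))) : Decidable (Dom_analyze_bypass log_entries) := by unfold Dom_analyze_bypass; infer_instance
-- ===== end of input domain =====

-- B replaces A's single interleaved if/elif accumulating loop by two independent
-- reverse searches (last BYPASSED / last DETECTED entry) and a direct dict assembly;
-- objective: alternative decomposition, same cost.

-- ===== PORT A =====
-- entry.get(k) on an association-list entry = first-match lookup of the Python dict
def pvGet (e : List (String × String)) (k : String) : Option String :=
  (PySem.Dict.mk e).get? k

-- A: one loop carrying (original_command, bypassed_command, bypass_technique)
def analyze_bypass (log_entries : List (List (String × String))) : List (String × Option String) :=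
  let s := log_entries.foldl
    (fun (bi : Option String × Option String × Option String) entry =>
      if pvGet entry "status" = some "BYPASSED" then
        (bi.1, pvGet entry "command", pvGet entry "phase")
      else if pvGet entry "status" = some "DETECTED" then
        (pvGet entry "command", bi.2.1, bi.2.2)
      else bi)
    (none, none, none)
  [("original_command", s.1), ("bypassed_command", s.2.1), ("bypass_technique", s.2.2)]

-- ===== PORT B =====
-- B: last BYPASSED and last DETECTED entries found independently by reverse search
def analyze_bypass_alt (log_entries : List (List (String × String))) : List (String × Option String) :=
  let entries := log_entries
  let byp := entries.reverse.find? (fun e => pvGet e "status" == some "BYPASSED")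
  let det := entries.reverse.find? (fun e => pvGet e "status" == some "DETECTED")
  [("original_command", det.bind (fun e => pvGet e "command")),
   ("bypassed_command", byp.bind (fun e => pvGet e "command")),
   ("bypass_technique", byp.bind (fun e => pvGet e "phase"))]

-- ===== PRECONDITION & SPEC =====
def Spec_analyze_bypass (log_entries : List (List (String × String))) (out : List (String × Option String)) : Prop := out = analyze_bypass_alt log_entries
instance (log_entries : List (List (String × String))) (out : List (String × Option String)) : Decidable (Spec_analyze_bypass log_entries out) := by unfold Spec_analyze_bypass; infer_instance

-- ===== CLAIM (what is proved, stated in full; the proofs are below) =====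
def Claim_equal_analyze_bypass : Prop := ∀ (log_entries : List (List (String × String))), Dom_analyze_bypass log_entries → Spec_analyze_bypass log_entries (analyze_bypass log_entries)

-- ===== LEMMAS AND PROOFS =====

-- the loop body of A, named for the lemmas
def pvStep (bi : Option String × Option String × Option String)
    (entry : List (String × String)) : Option String × Option String × Option String :=
  if pvGet entry "status" = some "BYPASSED" then
    (bi.1, pvGet entry "command", pvGet entry "phase")
  else if pvGet entry "status" = some "DETECTED" then
    (pvGet entry "command", bi.2.1, bi.2.2)
  else bi

-- the fold's state is exactly: last-DETECTED's command, last-BYPASSED's command & phase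
lemma foldl_step_char (l : List (List (String × String)))
    (bi : Option String × Option String × Option String) :
    l.foldl pvStep bi =
      ((l.reverse.find? (fun e => pvGet e "status" == some "DETECTED")).elim bi.1
          (fun e => pvGet e "command"),
       (l.reverse.find? (fun e => pvGet e "status" == some "BYPASSED")).elim bi.2.1
          (fun e => pvGet e "command"),
       (l.reverse.find? (fun e => pvGet e "status" == some "BYPASSED")).elim bi.2.2
          (fun e => pvGet e "phase")) := by
  induction l generalizing bi with
  | nil => simp
  | cons e l ih =>
    simp only [List.foldl_cons, ih, List.reverse_cons, List.find?_append]
    by_cases hB : pvGet e "status" = some "BYPASSED"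
    · have hD : ¬ pvGet e "status" = some "DETECTED" := by simp [hB]
      cases l.reverse.find? (fun e => pvGet e "status" == some "BYPASSED") <;>
        cases l.reverse.find? (fun e => pvGet e "status" == some "DETECTED") <;>
        simp [pvStep, hB, Option.or]
    · by_cases hD : pvGet e "status" = some "DETECTED"
      · cases l.reverse.find? (fun e => pvGet e "status" == some "BYPASSED") <;>
          cases l.reverse.find? (fun e => pvGet e "status" == some "DETECTED") <;>
          simp [pvStep, hD, Option.or]
      · cases l.reverse.find? (fun e => pvGet e "status" == some "BYPASSED") <;>
          cases l.reverse.find? (fun e => pvGet e "status" == some "DETECTED") <;>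
          simp [pvStep, hB, hD, Option.or]

-- ===== VERDICT (by name: the statement is the Claim_ definition above) =====
theorem analyze_bypass_spec : Claim_equal_analyze_bypass := by
  intro l _
  show analyze_bypass l = analyze_bypass_alt l
  have h : l.foldl pvStep (none, none, none) = _ := foldl_step_char l (none, none, none)
  simp only [analyze_bypass, analyze_bypass_alt]
  rw [show (fun (bi : Option String × Option String × Option String) entry =>
      if pvGet entry "status" = some "BYPASSED" then
        (bi.1, pvGet entry "command", pvGet entry "phase")
      else if pvGet entry "status" = some "DETECTED" then
        (pvGet entry "command", bi.2.1, bi.2.2)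
      else bi) = pvStep from rfl, h]
  cases l.reverse.find? (fun e => pvGet e "status" == some "BYPASSED") <;>
    cases l.reverse.find? (fun e => pvGet e "status" == some "DETECTED") <;>
    simp [Option.elim, Option.bind]
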